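-- pv_equiv track=rewrite | github.com/dream2globe/stream-mx-inspector | raw_message_processor/parser/inspector_log_parser.py | _log_to_record
-- ===== SOURCE A (Python) =====
-- DEFAULT_KEYS = [
--     "Test_Conditions",
--     "Measured_Value",
--     "Lower_Limit",
--     "Upper_Limit",
--     "P_F",
--     "Sec",
--     "Code_Value",
--     "Code_Lower_Limit",
--     "Code_Upper_Limit",
-- ]
--
-- def _log_to_record(
--
--     raw_text: str,
--     incremental_sequence: bool = True,
-- ) -> list[dict[str, str]]:
--     """csv형태의 로그 내용을 dictionary record 형태로 변환함"""
--
--     # 딕셔너리 리스트로 변환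
--     records = []
--     sequence = 0
--     for line in raw_text.split("\r\n"):
--         if not line or line.isspace():
--             continue
--         if line[0] == "#":
--             continue
--         test_item = dict(zip(DEFAULT_KEYS, map(str.strip, line.split(","))))
--         test_item["INSP_DTL_SEQ"] = str(sequence := sequence + 1) if incremental_sequence else str(0)
--         records.append(test_item)
--
--     # 최종 검사여부 확인
--     tested_items = set()
--     for record in records[::-1]:  # 역순으로 처음 등장 항목을 Y로 지정
--         record["IS_FINAL"] = "Y" if record["Test_Conditions"] not in tested_items else "N"
--         tested_items.add(record["Test_Conditions"])
--     return records
-- ===== SOURCE B (Python) =====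
-- DEFAULT_KEYS = [
--     "Test_Conditions",
--     "Measured_Value",
--     "Lower_Limit",
--     "Upper_Limit",
--     "P_F",
--     "Sec",
--     "Code_Value",
--     "Code_Lower_Limit",
--     "Code_Upper_Limit",
-- ]
--
--
-- def _log_to_record(
--     raw_text: str,
--     incremental_sequence: bool = True,
-- ) -> list[dict[str, str]]:
--     """csv형태의 로그 내용을 dictionary record 형태로 변환함"""
--
--     # keep the data lines, split and strip their fields
--     rows = [
--         [field.strip() for field in line.split(",")]
--         for line in raw_text.split("\r\n")
--         if line and not line.isspace() and line[0] != "#"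
--     ]
--
--     # build the records and a table mapping each Test_Conditions
--     # to the index of its LAST occurrence (later rows overwrite)
--     records = []
--     last_index = {}
--     for i, row in enumerate(rows):
--         record = dict(zip(DEFAULT_KEYS, row))
--         record["INSP_DTL_SEQ"] = str(i + 1) if incremental_sequence else str(0)
--         records.append(record)
--         last_index[record["Test_Conditions"]] = i
--
--     # a record is final exactly when it sits at that last index
--     for i, record in enumerate(records):
--         record["IS_FINAL"] = "Y" if last_index[record["Test_Conditions"]] == i else "N"
--     return records
-- ===== Notes on version B (the rewrite author's own statement) =====
-- stated objective: alternative
-- what changed: The reverse pass over records with a growing seen-set is replaced by two forward passes: a dict mapping each Test_Conditions to its last index (built while creating the records from a pre-filtered row list), then marking IS_FINAL by comparing each position with that last index.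
import Mathlib
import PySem

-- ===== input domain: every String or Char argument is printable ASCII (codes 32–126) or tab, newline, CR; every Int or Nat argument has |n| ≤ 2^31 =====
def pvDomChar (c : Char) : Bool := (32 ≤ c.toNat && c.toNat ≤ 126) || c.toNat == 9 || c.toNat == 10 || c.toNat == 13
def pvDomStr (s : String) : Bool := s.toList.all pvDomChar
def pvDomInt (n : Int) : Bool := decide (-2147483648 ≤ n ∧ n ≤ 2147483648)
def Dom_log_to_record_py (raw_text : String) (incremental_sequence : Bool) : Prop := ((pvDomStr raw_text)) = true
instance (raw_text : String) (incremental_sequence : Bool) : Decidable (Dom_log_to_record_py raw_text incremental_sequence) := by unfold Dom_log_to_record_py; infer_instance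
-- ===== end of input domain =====

-- B replaces A's reverse seen-set pass by a forward last-occurrence index table (alternative decomposition, same cost).


-- DEFAULT_KEYS (module constant, shared by both implementations)
def pvDefaultKeys : List String :=
  ["Test_Conditions", "Measured_Value", "Lower_Limit", "Upper_Limit", "P_F",
   "Sec", "Code_Value", "Code_Lower_Limit", "Code_Upper_Limit"]

-- record["Test_Conditions"] (always present: zip's first pair; used by both sides)
def pvTc (r : PySem.Dict String String) : String := PySem.Dict.getD r "Test_Conditions" ""

-- ===== PORT A =====
-- first loop of A: filter comment/blank lines, build records threading the sequence counter
def pvParseA (incr : Bool) : List String → Int → List (PySem.Dict String String)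
  | [], _ => []
  | line :: rest, seqv =>
    if line = "" ∨ PySem.Str.strIsspace line then pvParseA incr rest seqv
    else if PySem.Str.pyGet? line 0 = some '#' then pvParseA incr rest seqv
    else
      let seqv' := if incr then seqv + 1 else seqv
      let item :=
        PySem.Dict.insert
          (PySem.Dict.ofList (List.zip pvDefaultKeys
            ((((PySem.Str.split? line ",").getD []).map PySem.Str.strip))))
          "INSP_DTL_SEQ" (if incr then PySem.Int.toStr seqv' else PySem.Int.toStr 0)
      item :: pvParseA incr rest seqv'

-- second loop of A over records[::-1], threading the tested_items set (in-place IS_FINAL becomes an insert)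
def pvMarkA : List (PySem.Dict String String) → PySem.Set String → List (PySem.Dict String String)
  | [], _ => []
  | r :: rest, seen =>
    let tc := pvTc r
    PySem.Dict.insert r "IS_FINAL" (if PySem.Set.contains seen tc then "N" else "Y")
      :: pvMarkA rest (PySem.Set.add seen tc)

def log_to_record_py (raw_text : String) (incremental_sequence : Bool) : List (List (String × String)) :=
  let records := pvParseA incremental_sequence ((PySem.Str.split? raw_text "\r\n").getD []) 0
  ((pvMarkA records.reverse PySem.Set.empty).reverse).map PySem.Dict.items

-- ===== PORT B =====
-- B's rows comprehension
def pvRowsB (raw_text : String) : List (List String) :=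
  (((PySem.Str.split? raw_text "\r\n").getD []).filter
      (fun line => !(line == "") && !PySem.Str.strIsspace line && !(PySem.Str.pyGet? line 0 == some '#'))).map
    (fun line => ((PySem.Str.split? line ",").getD []).map PySem.Str.strip)

-- B's first loop: records plus the last-occurrence index table
def pvBuildB (incr : Bool) : List (List String) → Int → PySem.Dict String Int →
    List (PySem.Dict String String) × PySem.Dict String Int
  | [], _, d => ([], d)
  | row :: rest, i, d =>
    let record :=
      PySem.Dict.insert (PySem.Dict.ofList (List.zip pvDefaultKeys row))
        "INSP_DTL_SEQ" (if incr then PySem.Int.toStr (i + 1) else PySem.Int.toStr 0)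
    let res := pvBuildB incr rest (i + 1) (PySem.Dict.insert d (pvTc record) i)
    (record :: res.1, res.2)

-- B's second loop: IS_FINAL by comparing the position with the last index
def pvMarkB : List (PySem.Dict String String) → Int → PySem.Dict String Int → List (PySem.Dict String String)
  | [], _, _ => []
  | r :: rest, i, d =>
    PySem.Dict.insert r "IS_FINAL" (if PySem.Dict.getD d (pvTc r) 0 = i then "Y" else "N")
      :: pvMarkB rest (i + 1) d

def log_to_record_py_alt (raw_text : String) (incremental_sequence : Bool) : List (List (String × String)) :=
  let res := pvBuildB incremental_sequence (pvRowsB raw_text) 0 PySem.Dict.empty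
  (pvMarkB res.1 0 res.2).map PySem.Dict.items

-- ===== PRECONDITION & SPEC =====
def Spec_log_to_record_py (raw_text : String) (incremental_sequence : Bool) (out : List (List (String × String))) : Prop := out = log_to_record_py_alt raw_text incremental_sequence
instance (raw_text : String) (incremental_sequence : Bool) (out : List (List (String × String))) : Decidable (Spec_log_to_record_py raw_text incremental_sequence out) := by unfold Spec_log_to_record_py; infer_instance

-- ===== CLAIM (what is proved, stated in full; the proofs are below) =====
def Claim_equal_log_to_record_py : Prop := ∀ (raw_text : String) (incremental_sequence : Bool), Dom_log_to_record_py raw_text incremental_sequence → Spec_log_to_record_py raw_text incremental_sequence (log_to_record_py raw_text incremental_sequence)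

-- ===== LEMMAS AND PROOFS =====

-- reference marking: r is "Y" iff its Test_Conditions occurs neither in `seen` nor later in the list
def pvSpecMark : List (PySem.Dict String String) → PySem.Set String → List (PySem.Dict String String)
  | [], _ => []
  | r :: rest, seen =>
    PySem.Dict.insert r "IS_FINAL"
        (if PySem.Set.contains seen (pvTc r) ∨ (pvTc r) ∈ rest.map pvTc then "N" else "Y")
      :: pvSpecMark rest seen

-- the index (from the back) of the LAST occurrence of key, as pvBuildB's dict stores it
def pvLastOcc : List String → String → Option Nat
  | [], _ => none
  | x :: t, k =>
    match pvLastOcc t k with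
    | some j => some (j + 1)
    | none => if x = k then some 0 else none

def pvLastIdx : List (PySem.Dict String String) → Int → PySem.Dict String Int → PySem.Dict String Int
  | [], _, d => d
  | r :: t, i, d => pvLastIdx t (i + 1) (PySem.Dict.insert d (pvTc r) i)

theorem pvBuildB_snd (incr : Bool) (rows : List (List String)) (i : Int) (d : PySem.Dict String Int) :
    (pvBuildB incr rows i d).2 = pvLastIdx (pvBuildB incr rows i d).1 i d := by
  induction rows generalizing i d with
  | nil => rfl
  | cons row rest ih =>
    simp only [pvBuildB, pvLastIdx]
    exact ih ..

theorem pvParseA_eq_buildB (incr : Bool) (lines : List String) (s : Int) (d : PySem.Dict String Int)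
    (i : Int) (h : incr = true → i = s) :
    pvParseA incr lines s =
      (pvBuildB incr
        ((lines.filter
            (fun line => !(line == "") && !PySem.Str.strIsspace line && !(PySem.Str.pyGet? line 0 == some '#'))).map
          (fun line => ((PySem.Str.split? line ",").getD []).map PySem.Str.strip)) i d).1 := by
  induction lines generalizing s d i with
  | nil => rfl
  | cons line rest ih =>
    by_cases h1 : line = "" ∨ PySem.Str.strIsspace line
    · have hf : (!(line == "") && !PySem.Str.strIsspace line && !(PySem.Str.pyGet? line 0 == some '#')) = false := by
        rcases h1 with h1 | h1
        · subst h1; decide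
        · simp only [h1, Bool.not_true, Bool.and_false, Bool.false_and]
      simp only [pvParseA, if_pos h1, List.filter_cons, hf, Bool.false_eq_true, reduceIte]
      exact ih s d i h
    · by_cases h2 : PySem.Str.pyGet? line 0 = some '#'
      · have hf : (!(line == "") && !PySem.Str.strIsspace line && !(PySem.Str.pyGet? line 0 == some '#')) = false := by
          simp only [h2, beq_self_eq_true, Bool.not_true, Bool.and_false]
        simp only [pvParseA, if_neg h1, if_pos h2, List.filter_cons, hf, Bool.false_eq_true, reduceIte]
        exact ih s d i h
      · rw [not_or] at h1
        have e1 : (line == "") = false := beq_eq_false_iff_ne.mpr h1.1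
        have e2 : PySem.Str.strIsspace line = false := Bool.eq_false_iff.mpr h1.2
        have e3 : (PySem.Str.pyGet? line 0 == some '#') = false := beq_eq_false_iff_ne.mpr h2
        have ht : (!(line == "") && !PySem.Str.strIsspace line && !(PySem.Str.pyGet? line 0 == some '#')) = true := by
          simp only [e1, e2, e3, Bool.not_false, Bool.and_self]
        have h1' : ¬ (line = "" ∨ PySem.Str.strIsspace line = true) := by
          exact not_or.mpr ⟨h1.1, fun hh => h1.2 hh⟩
        simp only [pvParseA, if_neg h1', if_neg h2, List.filter_cons, ht, reduceIte, List.map_cons,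
          pvBuildB]
        refine List.cons_eq_cons.mpr ⟨?_, ?_⟩
        · by_cases hincr : incr = true
          · simp only [if_pos hincr, h hincr]
          · simp only [if_neg hincr]
        · exact ih _ _ (i + 1) (fun hincr => by rw [if_pos hincr, h hincr])

-- A's reverse pass computes pvSpecMark
theorem pvSpecMark_append_singleton (xs : List (PySem.Dict String String)) (r : PySem.Dict String String)
    (seen : PySem.Set String) :
    pvSpecMark (xs ++ [r]) seen =
      pvSpecMark xs (PySem.Set.add seen (pvTc r)) ++
        [PySem.Dict.insert r "IS_FINAL" (if PySem.Set.contains seen (pvTc r) then "N" else "Y")] := by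
  induction xs with
  | nil => simp [pvSpecMark]
  | cons x t ih =>
    simp only [List.cons_append, pvSpecMark, ih, List.map_append, List.map_cons, List.map_nil]
    refine List.cons_eq_cons.mpr ⟨?_, rfl⟩
    have hc : ∀ (s : PySem.Set String) (y : String), PySem.Set.contains s y = true ↔ y ∈ s := by
      intro s y; simp [PySem.Set.contains]
    have hiff : (PySem.Set.contains seen (pvTc x) = true ∨ pvTc x ∈ t.map pvTc ++ [pvTc r]) ↔
        (PySem.Set.contains (PySem.Set.add seen (pvTc r)) (pvTc x) = true ∨ pvTc x ∈ t.map pvTc) := by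
      rw [hc, hc, PySem.Set.mem_add]
      simp only [List.mem_append, List.mem_singleton]
      tauto
    exact congrArg _ (if_congr hiff rfl rfl)

theorem pvMarkA_reverse (l : List (PySem.Dict String String)) (seen : PySem.Set String) :
    (pvMarkA l seen).reverse = pvSpecMark l.reverse seen := by
  induction l generalizing seen with
  | nil => rfl
  | cons r t ih =>
    simp only [pvMarkA, List.reverse_cons, pvSpecMark_append_singleton, ih]

-- the dict pvLastIdx builds: get? key = start index + last occurrence of key among the Test_Conditions
theorem pvLastIdx_get? (rs : List (PySem.Dict String String)) (i : Int) (d : PySem.Dict String Int)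
    (key : String) :
    (pvLastIdx rs i d).get? key =
      match pvLastOcc (rs.map pvTc) key with
      | some j => some (i + (j : Int))
      | none => d.get? key := by
  induction rs generalizing i d with
  | nil => rfl
  | cons r t ih =>
    simp only [pvLastIdx, List.map_cons, pvLastOcc, ih]
    cases h : pvLastOcc (t.map pvTc) key with
    | some j => push_cast; ring_nf
    | none =>
      rw [PySem.Dict.get?_insert]
      by_cases hk : pvTc r = key
      · simp [hk]
      · have hk' : ¬ key = pvTc r := fun hh => hk hh.symm
        simp [hk, hk']

theorem pvLastOcc_eq_none_iff (l : List String) (k : String) : pvLastOcc l k = none ↔ k ∉ l := by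
  induction l with
  | nil => simp [pvLastOcc]
  | cons x xs ih =>
    simp only [pvLastOcc, List.mem_cons]
    cases h2 : pvLastOcc xs k with
    | some j2 =>
      show some (j2 + 1) = none ↔ ¬(k = x ∨ k ∈ xs)
      have hk : k ∈ xs := by
        by_contra hn
        simp [ih.mpr hn] at h2
      simp [hk]
    | none =>
      show (if x = k then some 0 else none) = none ↔ ¬(k = x ∨ k ∈ xs)
      by_cases hx : x = k
      · simp [hx]
      · have hkx : ¬ k = x := fun hh => hx hh.symm
        simp [hx, hkx, ih.mp h2]

theorem pvMarkB_eq_specMark (suf pre : List (PySem.Dict String String)) :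
    pvMarkB suf (pre.length : Int) (pvLastIdx (pre ++ suf) 0 PySem.Dict.empty) =
      pvSpecMark suf PySem.Set.empty := by
  induction suf generalizing pre with
  | nil => rfl
  | cons r t ih =>
    simp only [pvMarkB, pvSpecMark]
    refine List.cons_eq_cons.mpr ⟨?_, ?_⟩
    · -- the flag
      congr 1
      have hocc : ∃ j : Nat, pvLastOcc ((pre ++ r :: t).map pvTc) (pvTc r) = some (pre.length + j) ∧
          (j = 0 ↔ ¬ pvTc r ∈ t.map pvTc) := by
        have htail : ∃ j0 : Nat, pvLastOcc ((r :: t).map pvTc) (pvTc r) = some j0 ∧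
            (j0 = 0 ↔ ¬ pvTc r ∈ t.map pvTc) := by
          simp only [List.map_cons, pvLastOcc]
          cases h : pvLastOcc (t.map pvTc) (pvTc r) with
          | some j' =>
            refine ⟨j' + 1, rfl, ?_⟩
            constructor
            · omega
            · intro hn
              exfalso
              simp [(pvLastOcc_eq_none_iff _ _).mpr hn] at h
          | none =>
            refine ⟨0, by simp, ?_⟩
            simp only [true_iff]
            exact (pvLastOcc_eq_none_iff _ _).mp h
        obtain ⟨j0, hj0, hiff⟩ := htail
        refine ⟨j0, ?_, hiff⟩
        -- append lemma inline
        have : ∀ (xs ys : List String) (k : String) (j : Nat), pvLastOcc ys k = some j →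
            pvLastOcc (xs ++ ys) k = some (xs.length + j) := by
          intro xs ys k j hj
          induction xs with
          | nil => simpa using hj
          | cons x xt ihx => simp [pvLastOcc, ihx]; omega
        have := this (pre.map pvTc) ((r :: t).map pvTc) (pvTc r) j0 hj0
        rw [← List.map_append] at this
        simpa using this
      obtain ⟨j, hj, hiff⟩ := hocc
      have hget : (pvLastIdx (pre ++ r :: t) 0 PySem.Dict.empty).getD (pvTc r) 0 =
          (0 : Int) + ((pre.length + j : Nat) : Int) := by
        rw [PySem.Dict.getD_eq_get?_getD, pvLastIdx_get?, hj]
        rfl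
      by_cases hmem : pvTc r ∈ t.map pvTc
      · have hj0 : j ≠ 0 := by intro h0; exact (hiff.mp h0) hmem
        have : ¬ ((pvLastIdx (pre ++ r :: t) 0 PySem.Dict.empty).getD (pvTc r) 0 = (pre.length : Int)) := by
          rw [hget]; push_cast; omega
        simp [this, hmem, PySem.Set.empty]
      · have hj0 : j = 0 := hiff.mpr hmem
        have : (pvLastIdx (pre ++ r :: t) 0 PySem.Dict.empty).getD (pvTc r) 0 = (pre.length : Int) := by
          rw [hget, hj0]; push_cast; ring
        simp [this, hmem, PySem.Set.empty, PySem.Set.contains]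
    · -- the tail: use pre ++ [r]
      have := ih (pre ++ [r])
      simp only [List.append_assoc, List.cons_append, List.nil_append, List.length_append,
        List.length_cons, List.length_nil] at this
      have hlen : ((pre.length + 1 : Nat) : Int) = (pre.length : Int) + 1 := by push_cast; ring
      rw [← hlen]
      exact this

-- ===== VERDICT (by name: the statement is the Claim_ definition above) =====
theorem log_to_record_py_spec : Claim_equal_log_to_record_py := by
  intro raw_text incr _hdom
  unfold Spec_log_to_record_py log_to_record_py log_to_record_py_alt
  simp only []
  rw [pvBuildB_snd]
  set rows := pvRowsB raw_text with hrows
  have hrec : pvParseA incr ((PySem.Str.split? raw_text "\r\n").getD []) 0 =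
      (pvBuildB incr rows 0 PySem.Dict.empty).1 := by
    rw [hrows]
    exact pvParseA_eq_buildB incr _ 0 PySem.Dict.empty 0 (fun _ => rfl)
  rw [hrec]
  set rs := (pvBuildB incr rows 0 PySem.Dict.empty).1
  rw [pvMarkA_reverse, List.reverse_reverse]
  have h2 := pvMarkB_eq_specMark rs []
  simp only [List.nil_append, List.length_nil, Nat.cast_zero] at h2
  exact congrArg (List.map PySem.Dict.items) (by simpa using h2.symm)
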